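-- pv_equiv track=rewrite | github.com/hansglick/messages | fun.py | DefineTimeMarks
-- ===== SOURCE A (Python) =====
-- def DefineTimeMarks(lastdate,firstdate,step,window):
--
--     mark0 = firstdate + window
--     start = mark0
--     L = [start]
--
--     while(True):
--         newmark = start+step
--         if newmark>lastdate:
--             break
--         else:
--             L.append(newmark)
--             start=newmark
--
--     return L
-- ===== SOURCE B (Python) =====
-- def DefineTimeMarks(lastdate, firstdate, step, window):
--     # Closed-form: the first mark is always included; after that, the largest k
--     # with mark0 + k*step <= lastdate is (lastdate - mark0) // step.
--     mark0 = firstdate + window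
--     if step <= 0 or mark0 + step > lastdate:
--         return [mark0]
--     n = (lastdate - mark0) // step
--     return [mark0 + k * step for k in range(n + 1)]
-- ===== Notes on version B (the rewrite author's own statement) =====
-- stated objective: simpler
-- what changed: Replaced A's incremental while-loop that appends marks one by one with a closed-form count n = (lastdate - mark0) // step and a single range comprehension.
import Mathlib
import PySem

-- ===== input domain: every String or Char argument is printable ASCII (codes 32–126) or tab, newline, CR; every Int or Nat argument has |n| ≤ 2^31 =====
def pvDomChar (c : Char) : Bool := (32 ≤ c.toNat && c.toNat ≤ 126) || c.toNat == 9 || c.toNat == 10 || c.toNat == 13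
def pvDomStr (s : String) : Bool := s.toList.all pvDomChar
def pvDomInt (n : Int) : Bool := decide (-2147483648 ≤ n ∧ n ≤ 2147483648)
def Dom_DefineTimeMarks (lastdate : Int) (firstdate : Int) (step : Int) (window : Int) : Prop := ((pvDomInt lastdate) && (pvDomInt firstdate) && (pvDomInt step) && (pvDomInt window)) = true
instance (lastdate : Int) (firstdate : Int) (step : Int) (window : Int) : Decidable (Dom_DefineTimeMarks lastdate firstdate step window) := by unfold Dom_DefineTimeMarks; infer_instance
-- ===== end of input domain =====

-- B replaces A's incremental while-loop with a closed-form step count and a range comprehension (simpler).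

-- ===== PORT A =====
-- A's 'while True' loop, with fuel making it total; on Pre_ inputs the fuel is never exhausted.
def pvLoopA (lastdate step : Int) : Nat → Int → List Int → List Int
  | 0, _, L => L
  | fuel + 1, start, L =>
    let newmark := start + step
    if newmark > lastdate then L
    else pvLoopA lastdate step fuel newmark (L ++ [newmark])

def DefineTimeMarks (lastdate : Int) (firstdate : Int) (step : Int) (window : Int) : List Int :=
  let mark0 := firstdate + window
  pvLoopA lastdate step ((lastdate - mark0).toNat + 1) mark0 [mark0]

-- ===== PORT B =====
def DefineTimeMarks_alt (lastdate : Int) (firstdate : Int) (step : Int) (window : Int) : List Int :=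
  let mark0 := firstdate + window
  if step ≤ 0 ∨ mark0 + step > lastdate then [mark0]
  else
    let n := PySem.Int.floordiv (lastdate - mark0) step
    (PySem.List.pyRange 0 (n + 1) 1).map (fun k => mark0 + k * step)

-- ===== PRECONDITION & SPEC =====
-- Pre_ excludes exactly the inputs where A's while-loop never terminates
-- (non-positive step with firstdate + window + step ≤ lastdate); A returns on all others.
def Pre_DefineTimeMarks (lastdate : Int) (firstdate : Int) (step : Int) (window : Int) : Prop :=
  0 < step ∨ lastdate < firstdate + window + step
instance (lastdate : Int) (firstdate : Int) (step : Int) (window : Int) : Decidable (Pre_DefineTimeMarks lastdate firstdate step window) := by unfold Pre_DefineTimeMarks; infer_instance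

def pvWitness_DefineTimeMarks : Int × Int × Int × Int := (20, 1, 3, 2)

def Spec_DefineTimeMarks (lastdate : Int) (firstdate : Int) (step : Int) (window : Int) (out : List Int) : Prop := out = DefineTimeMarks_alt lastdate firstdate step window
instance (lastdate : Int) (firstdate : Int) (step : Int) (window : Int) (out : List Int) : Decidable (Spec_DefineTimeMarks lastdate firstdate step window out) := by unfold Spec_DefineTimeMarks; infer_instance

-- ===== CLAIM (what is proved, stated in full; the proofs are below) =====
def Claim_equal_DefineTimeMarks : Prop := ∀ (lastdate : Int) (firstdate : Int) (step : Int) (window : Int), Dom_DefineTimeMarks lastdate firstdate step window → Pre_DefineTimeMarks lastdate firstdate step window → Spec_DefineTimeMarks lastdate firstdate step window (DefineTimeMarks lastdate firstdate step window)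

-- ===== LEMMAS AND PROOFS =====

-- The loop, given enough fuel and a positive step, produces the marks start + k*step
-- for k = 1 .. (lastdate - start) // step appended to the accumulator.
theorem pvLoopA_closed (lastdate step : Int) (hs : 0 < step) :
    ∀ (fuel : Nat) (start : Int) (L : List Int), (lastdate - start).toNat < fuel →
      pvLoopA lastdate step fuel start L =
        L ++ (PySem.List.pyRange 1 (PySem.Int.floordiv (lastdate - start) step + 1) 1).map
              (fun k => start + k * step) := by
  intro fuel
  induction fuel with
  | zero => intro start L h; omega
  | succ fuel ih =>
    intro start L h
    by_cases hbr : start + step > lastdate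
    · have hn : PySem.Int.floordiv (lastdate - start) step < 1 := by
        rw [PySem.Int.floordiv_lt_iff_lt_mul hs]; omega
      simp only [pvLoopA, if_pos hbr]
      rw [PySem.List.pyRange_one_eq_nil (by omega)]
      simp
    · rw [not_lt] at hbr
      have hfuel : (lastdate - (start + step)).toNat < fuel := by omega
      have hrec := ih (start + step) (L ++ [start + step]) hfuel
      simp only [pvLoopA, if_neg (by omega : ¬ start + step > lastdate)]
      rw [hrec]
      -- relate the two floordivs: (d - step) // step = d // step - 1
      set d : Int := lastdate - start with hd
      have hq : PySem.Int.floordiv d step * step ≤ d ∧ d < (PySem.Int.floordiv d step + 1) * step :=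
        (PySem.Int.floordiv_eq_iff_of_pos hs).mp rfl
      set n : Int := PySem.Int.floordiv d step with hn
      have hshift : PySem.Int.floordiv (lastdate - (start + step)) step = n - 1 := by
        rw [PySem.Int.floordiv_eq_iff_of_pos hs]
        constructor <;> nlinarith [hq.1, hq.2]
      have hn1 : 1 ≤ n := by
        rw [hn, PySem.Int.le_floordiv_iff_mul_le hs]; omega
      have key : List.map (fun k => start + k * step) (PySem.List.pyRange 1 (n + 1))
          = (start + step) :: List.map (fun k => start + step + k * step)
              (PySem.List.pyRange 1 (n - 1 + 1)) := by
        rw [PySem.List.pyRange_one_cons (by omega : (1:Int) < n + 1)]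
        simp only [List.map_cons, PySem.List.pyRange_one, List.map_map]
        refine congrArg₂ List.cons (by ring) ?_
        rw [show (n - 1 + 1 - 1).toNat = (n + 1 - (1 + 1)).toNat from by omega]
        congr 1
        funext k
        simp only [Function.comp]
        ring
      rw [hshift, key]
      simp [List.append_assoc]
-- ===== VERDICT (by name: the statement is the Claim_ definition above) =====
theorem DefineTimeMarks_spec : Claim_equal_DefineTimeMarks := by
  intro lastdate firstdate step window _ hpre
  unfold Spec_DefineTimeMarks DefineTimeMarks DefineTimeMarks_alt
  set mark0 : Int := firstdate + window with hm
  by_cases hbr : step ≤ 0 ∨ mark0 + step > lastdate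
  · -- B returns [mark0]; Pre_ forces the loop to break on its first iteration
    have hbreak : mark0 + step > lastdate := by
      unfold Pre_DefineTimeMarks at hpre; omega
    simp only [if_pos hbr]
    show pvLoopA lastdate step ((lastdate - mark0).toNat + 1) mark0 [mark0] = [mark0]
    simp only [pvLoopA, if_pos hbreak]
  · rw [not_or, not_le, not_lt] at hbr
    obtain ⟨hs', hle⟩ := hbr
    have hs : 0 < step := by omega
    simp only [if_neg (show ¬(step ≤ 0 ∨ mark0 + step > lastdate) by omega)]
    rw [pvLoopA_closed lastdate step hs _ mark0 [mark0] (by omega)]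
    set n : Int := PySem.Int.floordiv (lastdate - mark0) step with hn
    have hn1 : 1 ≤ n := by
      rw [hn, PySem.Int.le_floordiv_iff_mul_le hs]; omega
    rw [PySem.List.pyRange_one_cons (by omega : (0:Int) < n + 1)]
    simp
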